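-- pv_equiv track=rewrite | github.com/jdfalk/safe-ai-util | final_project_assignments.py | categorize_real_issue
-- ===== SOURCE A (Python) =====
-- from typing import List
--
-- def categorize_real_issue(issue_number: int, title: str, labels: List[str]) -> str:
--     """Categorize actual issues based on their labels and content"""
--     label_set = {label.lower() for label in labels}
--     title_lower = title.lower()
--
--     # Backend Services - APIs, authentication, databases, metrics, gRPC
--     backend_indicators = {
--         "module:auth",
--         "module:api",
--         "module:database",
--         "module:metrics",
--         "module:cache",
--         "module:config",
--         "module:queue",
--         "auth",
--         "grpc",
--         "proto",
--         "protobuf",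
--         "migration",
--     }
--
--     # Web & UI - web services, frontend, UI components
--     web_ui_indicators = {"module:web", "module:ui", "frontend", "web", "ui"}
--
--     # Infrastructure - CI/CD, deployment, automation, GitHub Actions
--     infrastructure_indicators = {
--         "ci-cd",
--         "github-actions",
--         "deployment",
--         "build",
--         "release",
--         "automation",
--         "workflow",
--         "docker",
--         "cosign",
--     }
--
--     # Documentation - docs, examples, guides
--     documentation_indicators = {"documentation", "docs", "examples", "guide", "readme"}
--
--     # Testing - test cases, QA, validation
--     testing_indicators = {
--         "test",
--         "testing",
--         "integration",
--         "unit-tests",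
--         "qa",
--         "validation",
--         "area:testing",
--     }
--
--     # SDKs & Tools - CLI, utilities, development tools
--     tools_indicators = {
--         "sdk",
--         "tools",
--         "cli",
--         "utility",
--         "script",
--         "generator",
--         "dependencies",
--     }
--
--     # Check categories in priority order
--     if label_set.intersection(backend_indicators) or any(
--         word in title_lower for word in ["grpc", "auth", "proto", "database"]
--     ):
--         return "Backend Services"
--     elif label_set.intersection(web_ui_indicators) or "/api/" in title_lower:
--         return "Web & UI"
--     elif label_set.intersection(infrastructure_indicators) or any(
--         word in title_lower for word in ["ci", "workflow", "build"]
--     ):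
--         return "Infrastructure"
--     elif label_set.intersection(documentation_indicators) or "doc" in title_lower:
--         return "Documentation"
--     elif label_set.intersection(testing_indicators) or "test" in title_lower:
--         return "Testing"
--     elif label_set.intersection(tools_indicators) or any(
--         word in title_lower for word in ["cli", "tool", "script"]
--     ):
--         return "SDKs & Tools"
--     else:
--         return "General"
-- ===== SOURCE B (Python) =====
-- # Inverted index: each indicator word maps to the rank of its category; the
-- # answer is the category of the smallest rank matched by any label or any
-- # title keyword (rank 6 = "General").
--
-- _CATEGORIES = [
--     "Backend Services", "Web & UI", "Infrastructure",
--     "Documentation", "Testing", "SDKs & Tools", "General",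
-- ]
--
-- _LABEL_RANK = {
--     "module:auth": 0, "module:api": 0, "module:database": 0,
--     "module:metrics": 0, "module:cache": 0, "module:config": 0,
--     "module:queue": 0, "auth": 0, "grpc": 0, "proto": 0,
--     "protobuf": 0, "migration": 0,
--     "module:web": 1, "module:ui": 1, "frontend": 1, "web": 1, "ui": 1,
--     "ci-cd": 2, "github-actions": 2, "deployment": 2, "build": 2,
--     "release": 2, "automation": 2, "workflow": 2, "docker": 2, "cosign": 2,
--     "documentation": 3, "docs": 3, "examples": 3, "guide": 3, "readme": 3,
--     "test": 4, "testing": 4, "integration": 4, "unit-tests": 4,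
--     "qa": 4, "validation": 4, "area:testing": 4,
--     "sdk": 5, "tools": 5, "cli": 5, "utility": 5, "script": 5,
--     "generator": 5, "dependencies": 5,
-- }
--
-- _TITLE_KEYWORDS = [
--     (0, "grpc"), (0, "auth"), (0, "proto"), (0, "database"),
--     (1, "/api/"),
--     (2, "ci"), (2, "workflow"), (2, "build"),
--     (3, "doc"),
--     (4, "test"),
--     (5, "cli"), (5, "tool"), (5, "script"),
-- ]
--
--
-- def categorize_real_issue(issue_number, title, labels):
--     """Categorize actual issues based on their labels and content"""
--     best = 6
--     for label in labels:
--         rank = _LABEL_RANK.get(label.lower(), 6)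
--         if rank < best:
--             best = rank
--     title_lower = title.lower()
--     for rank, keyword in _TITLE_KEYWORDS:
--         if rank < best and keyword in title_lower:
--             best = rank
--     return _CATEGORIES[best]
-- ===== Notes on version B (the rewrite author's own statement) =====
-- stated objective: alternative
-- what changed: Replaces A's six per-category set intersections and if/elif chain by an inverted index (one dict mapping each indicator word to its category's rank) plus a single running-minimum over labels and title keywords, finishing with a table lookup of the winning rank.
import Mathlib
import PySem

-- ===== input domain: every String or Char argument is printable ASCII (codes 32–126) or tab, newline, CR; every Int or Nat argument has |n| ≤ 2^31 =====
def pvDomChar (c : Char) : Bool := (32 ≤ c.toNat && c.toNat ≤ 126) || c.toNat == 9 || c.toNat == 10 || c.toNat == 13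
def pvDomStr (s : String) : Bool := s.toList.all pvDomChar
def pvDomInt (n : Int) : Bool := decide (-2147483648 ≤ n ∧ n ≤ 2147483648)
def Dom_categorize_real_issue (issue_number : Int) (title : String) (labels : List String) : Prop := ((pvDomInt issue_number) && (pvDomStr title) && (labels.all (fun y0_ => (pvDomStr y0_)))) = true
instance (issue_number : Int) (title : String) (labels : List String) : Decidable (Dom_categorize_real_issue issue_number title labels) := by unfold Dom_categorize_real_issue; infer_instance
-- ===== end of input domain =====

-- B replaces A's per-category set intersections and if/elif chain by an inverted index:
-- one dict mapping every indicator word to its category's rank, a running minimum rank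
-- over the labels and the title keywords, and a final table lookup (alternative algorithm, same cost).

-- ===== PORT A =====
def categorize_real_issue (issue_number : Int) (title : String) (labels : List String) : String :=
  let label_set : PySem.Set String := PySem.Set.ofList (labels.map (fun label => PySem.Str.lower label))
  let title_lower := PySem.Str.lower title
  let backend_indicators : PySem.Set String := PySem.Set.ofList ["module:auth", "module:api", "module:database", "module:metrics", "module:cache", "module:config", "module:queue", "auth", "grpc", "proto", "protobuf", "migration"]
  let web_ui_indicators : PySem.Set String := PySem.Set.ofList ["module:web", "module:ui", "frontend", "web", "ui"]
  let infrastructure_indicators : PySem.Set String := PySem.Set.ofList ["ci-cd", "github-actions", "deployment", "build", "release", "automation", "workflow", "docker", "cosign"]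
  let documentation_indicators : PySem.Set String := PySem.Set.ofList ["documentation", "docs", "examples", "guide", "readme"]
  let testing_indicators : PySem.Set String := PySem.Set.ofList ["test", "testing", "integration", "unit-tests", "qa", "validation", "area:testing"]
  let tools_indicators : PySem.Set String := PySem.Set.ofList ["sdk", "tools", "cli", "utility", "script", "generator", "dependencies"]
  if PySem.Set.inter label_set backend_indicators ≠ [] ∨
      (["grpc", "auth", "proto", "database"].any (fun word => PySem.Str.isIn word title_lower)) then
    "Backend Services"
  else if PySem.Set.inter label_set web_ui_indicators ≠ [] ∨ PySem.Str.isIn "/api/" title_lower then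
    "Web & UI"
  else if PySem.Set.inter label_set infrastructure_indicators ≠ [] ∨
      (["ci", "workflow", "build"].any (fun word => PySem.Str.isIn word title_lower)) then
    "Infrastructure"
  else if PySem.Set.inter label_set documentation_indicators ≠ [] ∨ PySem.Str.isIn "doc" title_lower then
    "Documentation"
  else if PySem.Set.inter label_set testing_indicators ≠ [] ∨ PySem.Str.isIn "test" title_lower then
    "Testing"
  else if PySem.Set.inter label_set tools_indicators ≠ [] ∨
      (["cli", "tool", "script"].any (fun word => PySem.Str.isIn word title_lower)) then
    "SDKs & Tools"
  else
    "General"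

-- ===== PORT B =====
def pvCategories : List String :=
  ["Backend Services", "Web & UI", "Infrastructure", "Documentation", "Testing", "SDKs & Tools", "General"]

def pvLabelPairs : List (String × Int) :=
  [("module:auth", 0),
   ("module:api", 0),
   ("module:database", 0),
   ("module:metrics", 0),
   ("module:cache", 0),
   ("module:config", 0),
   ("module:queue", 0),
   ("auth", 0),
   ("grpc", 0),
   ("proto", 0),
   ("protobuf", 0),
   ("migration", 0),
   ("module:web", 1),
   ("module:ui", 1),
   ("frontend", 1),
   ("web", 1),
   ("ui", 1),
   ("ci-cd", 2),
   ("github-actions", 2),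
   ("deployment", 2),
   ("build", 2),
   ("release", 2),
   ("automation", 2),
   ("workflow", 2),
   ("docker", 2),
   ("cosign", 2),
   ("documentation", 3),
   ("docs", 3),
   ("examples", 3),
   ("guide", 3),
   ("readme", 3),
   ("test", 4),
   ("testing", 4),
   ("integration", 4),
   ("unit-tests", 4),
   ("qa", 4),
   ("validation", 4),
   ("area:testing", 4),
   ("sdk", 5),
   ("tools", 5),
   ("cli", 5),
   ("utility", 5),
   ("script", 5),
   ("generator", 5),
   ("dependencies", 5)]

def pvLabelRank : PySem.Dict String Int := PySem.Dict.ofList pvLabelPairs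

def pvTitleKeywords : List (Int × String) :=
  [((0 : Int), "grpc"), ((0 : Int), "auth"), ((0 : Int), "proto"), ((0 : Int), "database"), ((1 : Int), "/api/"), ((2 : Int), "ci"), ((2 : Int), "workflow"), ((2 : Int), "build"), ((3 : Int), "doc"), ((4 : Int), "test"), ((5 : Int), "cli"), ((5 : Int), "tool"), ((5 : Int), "script")]

def categorize_real_issue_alt (issue_number : Int) (title : String) (labels : List String) : String :=
  let best : Int := labels.foldl (fun best label =>
    let rank := PySem.Dict.getD pvLabelRank (PySem.Str.lower label) 6
    if rank < best then rank else best) 6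
  let title_lower := PySem.Str.lower title
  let best : Int := pvTitleKeywords.foldl (fun best rk =>
    if rk.1 < best ∧ PySem.Str.isIn rk.2 title_lower then rk.1 else best) best
  PySem.List.pyGetD pvCategories best "General"

-- ===== PRECONDITION & SPEC =====
def Spec_categorize_real_issue (issue_number : Int) (title : String) (labels : List String) (out : String) : Prop := out = categorize_real_issue_alt issue_number title labels
instance (issue_number : Int) (title : String) (labels : List String) (out : String) : Decidable (Spec_categorize_real_issue issue_number title labels out) := by unfold Spec_categorize_real_issue; infer_instance

-- ===== CLAIM (what is proved, stated in full; the proofs are below) =====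
def Claim_equal_categorize_real_issue : Prop := ∀ (issue_number : Int) (title : String) (labels : List String), Dom_categorize_real_issue issue_number title labels → Spec_categorize_real_issue issue_number title labels (categorize_real_issue issue_number title labels)

-- ===== LEMMAS AND PROOFS =====

-- the six indicator word lists, in priority order
def PVL0 : List String := ["module:auth", "module:api", "module:database", "module:metrics", "module:cache", "module:config", "module:queue", "auth", "grpc", "proto", "protobuf", "migration"]
def PVL1 : List String := ["module:web", "module:ui", "frontend", "web", "ui"]
def PVL2 : List String := ["ci-cd", "github-actions", "deployment", "build", "release", "automation", "workflow", "docker", "cosign"]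
def PVL3 : List String := ["documentation", "docs", "examples", "guide", "readme"]
def PVL4 : List String := ["test", "testing", "integration", "unit-tests", "qa", "validation", "area:testing"]
def PVL5 : List String := ["sdk", "tools", "cli", "utility", "script", "generator", "dependencies"]

-- 'first true position' as an Int rank (6 = none)
def pvCh6 (x0 x1 x2 x3 x4 x5 : Bool) : Int :=
  if x0 then 0 else if x1 then 1 else if x2 then 2 else if x3 then 3 else if x4 then 4 else if x5 then 5 else 6

theorem pvCh6_le6 (x0 x1 x2 x3 x4 x5 : Bool) : pvCh6 x0 x1 x2 x3 x4 x5 ≤ 6 := by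
  cases x0 <;> cases x1 <;> cases x2 <;> cases x3 <;> cases x4 <;> cases x5 <;> decide

theorem pvCh6_min (x0 x1 x2 x3 x4 x5 y0 y1 y2 y3 y4 y5 : Bool) :
    min (pvCh6 x0 x1 x2 x3 x4 x5) (pvCh6 y0 y1 y2 y3 y4 y5) =
      pvCh6 (x0||y0) (x1||y1) (x2||y2) (x3||y3) (x4||y4) (x5||y5) := by
  cases x0 <;> cases x1 <;> cases x2 <;> cases x3 <;> cases x4 <;> cases x5 <;>
    cases y0 <;> cases y1 <;> cases y2 <;> cases y3 <;> cases y4 <;> cases y5 <;> decide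

-- the per-word rank of the inverted index is the priority position among the six word lists
set_option maxRecDepth 16384 in
set_option maxHeartbeats 2000000 in
theorem pvRank_spec (s : String) :
    PySem.Dict.getD pvLabelRank s 6 =
      pvCh6 (PVL0.contains s) (PVL1.contains s) (PVL2.contains s)
        (PVL3.contains s) (PVL4.contains s) (PVL5.contains s) := by
  have hd : pvLabelRank = PySem.Dict.mk pvLabelPairs := by decide
  rw [hd]
  by_cases h1 : s = "module:auth"
  · subst h1; decide
  by_cases h2 : s = "module:api"
  · subst h2; decide
  by_cases h3 : s = "module:database"
  · subst h3; decide
  by_cases h4 : s = "module:metrics"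
  · subst h4; decide
  by_cases h5 : s = "module:cache"
  · subst h5; decide
  by_cases h6 : s = "module:config"
  · subst h6; decide
  by_cases h7 : s = "module:queue"
  · subst h7; decide
  by_cases h8 : s = "auth"
  · subst h8; decide
  by_cases h9 : s = "grpc"
  · subst h9; decide
  by_cases h10 : s = "proto"
  · subst h10; decide
  by_cases h11 : s = "protobuf"
  · subst h11; decide
  by_cases h12 : s = "migration"
  · subst h12; decide
  by_cases h13 : s = "module:web"
  · subst h13; decide
  by_cases h14 : s = "module:ui"
  · subst h14; decide
  by_cases h15 : s = "frontend"
  · subst h15; decide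
  by_cases h16 : s = "web"
  · subst h16; decide
  by_cases h17 : s = "ui"
  · subst h17; decide
  by_cases h18 : s = "ci-cd"
  · subst h18; decide
  by_cases h19 : s = "github-actions"
  · subst h19; decide
  by_cases h20 : s = "deployment"
  · subst h20; decide
  by_cases h21 : s = "build"
  · subst h21; decide
  by_cases h22 : s = "release"
  · subst h22; decide
  by_cases h23 : s = "automation"
  · subst h23; decide
  by_cases h24 : s = "workflow"
  · subst h24; decide
  by_cases h25 : s = "docker"
  · subst h25; decide
  by_cases h26 : s = "cosign"
  · subst h26; decide
  by_cases h27 : s = "documentation"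
  · subst h27; decide
  by_cases h28 : s = "docs"
  · subst h28; decide
  by_cases h29 : s = "examples"
  · subst h29; decide
  by_cases h30 : s = "guide"
  · subst h30; decide
  by_cases h31 : s = "readme"
  · subst h31; decide
  by_cases h32 : s = "test"
  · subst h32; decide
  by_cases h33 : s = "testing"
  · subst h33; decide
  by_cases h34 : s = "integration"
  · subst h34; decide
  by_cases h35 : s = "unit-tests"
  · subst h35; decide
  by_cases h36 : s = "qa"
  · subst h36; decide
  by_cases h37 : s = "validation"
  · subst h37; decide
  by_cases h38 : s = "area:testing"
  · subst h38; decide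
  by_cases h39 : s = "sdk"
  · subst h39; decide
  by_cases h40 : s = "tools"
  · subst h40; decide
  by_cases h41 : s = "cli"
  · subst h41; decide
  by_cases h42 : s = "utility"
  · subst h42; decide
  by_cases h43 : s = "script"
  · subst h43; decide
  by_cases h44 : s = "generator"
  · subst h44; decide
  by_cases h45 : s = "dependencies"
  · subst h45; decide
  simp [PySem.Dict.getD, PySem.Dict.get?, pvCh6, PVL0, PVL1, PVL2, PVL3, PVL4, PVL5,
    pvLabelPairs, List.find?,
    show (("module:auth" : String) == s) = false from by simp [beq_eq_false_iff_ne, Ne.symm h1],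
    show (("module:api" : String) == s) = false from by simp [beq_eq_false_iff_ne, Ne.symm h2],
    show (("module:database" : String) == s) = false from by simp [beq_eq_false_iff_ne, Ne.symm h3],
    show (("module:metrics" : String) == s) = false from by simp [beq_eq_false_iff_ne, Ne.symm h4],
    show (("module:cache" : String) == s) = false from by simp [beq_eq_false_iff_ne, Ne.symm h5],
    show (("module:config" : String) == s) = false from by simp [beq_eq_false_iff_ne, Ne.symm h6],
    show (("module:queue" : String) == s) = false from by simp [beq_eq_false_iff_ne, Ne.symm h7],
    show (("auth" : String) == s) = false from by simp [beq_eq_false_iff_ne, Ne.symm h8],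
    show (("grpc" : String) == s) = false from by simp [beq_eq_false_iff_ne, Ne.symm h9],
    show (("proto" : String) == s) = false from by simp [beq_eq_false_iff_ne, Ne.symm h10],
    show (("protobuf" : String) == s) = false from by simp [beq_eq_false_iff_ne, Ne.symm h11],
    show (("migration" : String) == s) = false from by simp [beq_eq_false_iff_ne, Ne.symm h12],
    show (("module:web" : String) == s) = false from by simp [beq_eq_false_iff_ne, Ne.symm h13],
    show (("module:ui" : String) == s) = false from by simp [beq_eq_false_iff_ne, Ne.symm h14],
    show (("frontend" : String) == s) = false from by simp [beq_eq_false_iff_ne, Ne.symm h15],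
    show (("web" : String) == s) = false from by simp [beq_eq_false_iff_ne, Ne.symm h16],
    show (("ui" : String) == s) = false from by simp [beq_eq_false_iff_ne, Ne.symm h17],
    show (("ci-cd" : String) == s) = false from by simp [beq_eq_false_iff_ne, Ne.symm h18],
    show (("github-actions" : String) == s) = false from by simp [beq_eq_false_iff_ne, Ne.symm h19],
    show (("deployment" : String) == s) = false from by simp [beq_eq_false_iff_ne, Ne.symm h20],
    show (("build" : String) == s) = false from by simp [beq_eq_false_iff_ne, Ne.symm h21],
    show (("release" : String) == s) = false from by simp [beq_eq_false_iff_ne, Ne.symm h22],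
    show (("automation" : String) == s) = false from by simp [beq_eq_false_iff_ne, Ne.symm h23],
    show (("workflow" : String) == s) = false from by simp [beq_eq_false_iff_ne, Ne.symm h24],
    show (("docker" : String) == s) = false from by simp [beq_eq_false_iff_ne, Ne.symm h25],
    show (("cosign" : String) == s) = false from by simp [beq_eq_false_iff_ne, Ne.symm h26],
    show (("documentation" : String) == s) = false from by simp [beq_eq_false_iff_ne, Ne.symm h27],
    show (("docs" : String) == s) = false from by simp [beq_eq_false_iff_ne, Ne.symm h28],
    show (("examples" : String) == s) = false from by simp [beq_eq_false_iff_ne, Ne.symm h29],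
    show (("guide" : String) == s) = false from by simp [beq_eq_false_iff_ne, Ne.symm h30],
    show (("readme" : String) == s) = false from by simp [beq_eq_false_iff_ne, Ne.symm h31],
    show (("test" : String) == s) = false from by simp [beq_eq_false_iff_ne, Ne.symm h32],
    show (("testing" : String) == s) = false from by simp [beq_eq_false_iff_ne, Ne.symm h33],
    show (("integration" : String) == s) = false from by simp [beq_eq_false_iff_ne, Ne.symm h34],
    show (("unit-tests" : String) == s) = false from by simp [beq_eq_false_iff_ne, Ne.symm h35],
    show (("qa" : String) == s) = false from by simp [beq_eq_false_iff_ne, Ne.symm h36],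
    show (("validation" : String) == s) = false from by simp [beq_eq_false_iff_ne, Ne.symm h37],
    show (("area:testing" : String) == s) = false from by simp [beq_eq_false_iff_ne, Ne.symm h38],
    show (("sdk" : String) == s) = false from by simp [beq_eq_false_iff_ne, Ne.symm h39],
    show (("tools" : String) == s) = false from by simp [beq_eq_false_iff_ne, Ne.symm h40],
    show (("cli" : String) == s) = false from by simp [beq_eq_false_iff_ne, Ne.symm h41],
    show (("utility" : String) == s) = false from by simp [beq_eq_false_iff_ne, Ne.symm h42],
    show (("script" : String) == s) = false from by simp [beq_eq_false_iff_ne, Ne.symm h43],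
    show (("generator" : String) == s) = false from by simp [beq_eq_false_iff_ne, Ne.symm h44],
    show (("dependencies" : String) == s) = false from by simp [beq_eq_false_iff_ne, Ne.symm h45],
    h1, h2, h3, h4, h5, h6, h7, h8, h9, h10, h11, h12, h13, h14, h15, h16, h17, h18, h19, h20, h21, h22, h23, h24, h25, h26, h27, h28, h29, h30, h31, h32, h33, h34, h35, h36, h37, h38, h39, h40, h41, h42, h43, h44, h45]


-- pulling the accumulator out of a running-minimum fold
theorem pv_foldl_min_acc {α : Type} (f : α → Int) (c d : Int) (l : List α) :
    l.foldl (fun a x => min a (f x)) (min c d) = min c (l.foldl (fun a x => min a (f x)) d) := by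
  induction l generalizing d with
  | nil => rfl
  | cons x l ih => simpa [min_assoc] using ih (min d (f x))

-- the labels pass of B computes the rank of the first category some label hits
theorem pv_labels_fold (labels : List String) :
    labels.foldl (fun a l => min a (PySem.Dict.getD pvLabelRank (PySem.Str.lower l) 6)) 6 =
      pvCh6 (labels.any (fun l => PVL0.contains (PySem.Str.lower l)))
        (labels.any (fun l => PVL1.contains (PySem.Str.lower l)))
        (labels.any (fun l => PVL2.contains (PySem.Str.lower l)))
        (labels.any (fun l => PVL3.contains (PySem.Str.lower l)))
        (labels.any (fun l => PVL4.contains (PySem.Str.lower l)))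
        (labels.any (fun l => PVL5.contains (PySem.Str.lower l))) := by
  induction labels with
  | nil => rfl
  | cons y tl ih =>
    have h1 : (y :: tl).foldl (fun a l => min a (PySem.Dict.getD pvLabelRank (PySem.Str.lower l) 6)) 6
        = min (PySem.Dict.getD pvLabelRank (PySem.Str.lower y) 6)
            (tl.foldl (fun a l => min a (PySem.Dict.getD pvLabelRank (PySem.Str.lower l) 6)) 6) := by
      have := pv_foldl_min_acc (fun l => PySem.Dict.getD pvLabelRank (PySem.Str.lower l) 6)
        (PySem.Dict.getD pvLabelRank (PySem.Str.lower y) 6) 6 tl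
      simpa [List.foldl_cons, min_comm] using this
    rw [h1, ih, pvRank_spec, pvCh6_min]
    simp [List.any_cons]

-- the guarded title pass is a running minimum over (matched rank, else 6)
theorem pv_title_fold (tl : String) (ps : List (Int × String)) (hps : ∀ p ∈ ps, p.1 ≤ 6) :
    ∀ b : Int, b ≤ 6 →
      ps.foldl (fun best rk => if rk.1 < best ∧ PySem.Str.isIn rk.2 tl then rk.1 else best) b =
        min b (ps.foldl (fun a rk => min a (if PySem.Str.isIn rk.2 tl then rk.1 else 6)) 6) := by
  induction ps with
  | nil => intro b hb; simp; omega
  | cons p ps ih =>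
    intro b hb
    have hstep : (if p.1 < b ∧ PySem.Str.isIn p.2 tl then p.1 else b)
        = min b (if PySem.Str.isIn p.2 tl then p.1 else 6) := by
      cases hh : PySem.Str.isIn p.2 tl <;> simp [min_def] <;> omega
    have hacc : ps.foldl (fun a rk => min a (if PySem.Str.isIn rk.2 tl then rk.1 else 6))
          (min 6 (if PySem.Str.isIn p.2 tl then p.1 else 6))
        = min (if PySem.Str.isIn p.2 tl then p.1 else 6)
            (ps.foldl (fun a rk => min a (if PySem.Str.isIn rk.2 tl then rk.1 else 6)) 6) := by
      have := pv_foldl_min_acc (fun rk => if PySem.Str.isIn rk.2 tl then rk.1 else (6:Int))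
        (if PySem.Str.isIn p.2 tl then p.1 else 6) 6 ps
      simpa [min_comm] using this
    have hble : min b (if PySem.Str.isIn p.2 tl then p.1 else 6) ≤ 6 := le_trans (min_le_left _ _) hb
    calc (p :: ps).foldl (fun best rk => if rk.1 < best ∧ PySem.Str.isIn rk.2 tl then rk.1 else best) b
        = ps.foldl (fun best rk => if rk.1 < best ∧ PySem.Str.isIn rk.2 tl then rk.1 else best)
            (min b (if PySem.Str.isIn p.2 tl then p.1 else 6)) := by rw [List.foldl_cons, hstep]
      _ = min (min b (if PySem.Str.isIn p.2 tl then p.1 else 6))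
            (ps.foldl (fun a rk => min a (if PySem.Str.isIn rk.2 tl then rk.1 else 6)) 6) :=
            ih (fun p hp => hps p (List.mem_cons_of_mem _ hp)) _ hble
      _ = min b (min (if PySem.Str.isIn p.2 tl then p.1 else 6)
            (ps.foldl (fun a rk => min a (if PySem.Str.isIn rk.2 tl then rk.1 else 6)) 6)) := min_assoc _ _ _
      _ = _ := by rw [List.foldl_cons, hacc]

-- the title keywords' running minimum, grouped by rank
theorem pv_title_val (tl : String) :
    pvTitleKeywords.foldl (fun a rk => min a (if PySem.Str.isIn rk.2 tl then rk.1 else 6)) 6 =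
      pvCh6 (["grpc", "auth", "proto", "database"].any (fun word => PySem.Str.isIn word tl))
        (PySem.Str.isIn "/api/" tl)
        (["ci", "workflow", "build"].any (fun word => PySem.Str.isIn word tl))
        (PySem.Str.isIn "doc" tl)
        (PySem.Str.isIn "test" tl)
        (["cli", "tool", "script"].any (fun word => PySem.Str.isIn word tl)) := by
  simp only [pvTitleKeywords, List.foldl_cons, List.foldl_nil, List.any_cons, List.any_nil, Bool.or_false]
  generalize PySem.Str.isIn "grpc" tl = c1
  generalize PySem.Str.isIn "auth" tl = c2
  generalize PySem.Str.isIn "proto" tl = c3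
  generalize PySem.Str.isIn "database" tl = c4
  generalize PySem.Str.isIn "/api/" tl = c5
  generalize PySem.Str.isIn "ci" tl = c6
  generalize PySem.Str.isIn "workflow" tl = c7
  generalize PySem.Str.isIn "build" tl = c8
  generalize PySem.Str.isIn "doc" tl = c9
  generalize PySem.Str.isIn "test" tl = c10
  generalize PySem.Str.isIn "cli" tl = c11
  generalize PySem.Str.isIn "tool" tl = c12
  generalize PySem.Str.isIn "script" tl = c13
  cases c1 <;> cases c2 <;> cases c3 <;> cases c4 <;> cases c5 <;> cases c6 <;> cases c7 <;>
    cases c8 <;> cases c9 <;> cases c10 <;> cases c11 <;> cases c12 <;> cases c13 <;> decide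

-- indexing the category table at the combined minimum rank is A's if/elif chain
theorem pv_catof (a0 a1 a2 a3 a4 a5 t0 t1 t2 t3 t4 t5 : Bool) :
    PySem.List.pyGetD pvCategories (min (pvCh6 a0 a1 a2 a3 a4 a5) (pvCh6 t0 t1 t2 t3 t4 t5)) "General" =
      (if a0 = true ∨ t0 = true then "Backend Services"
       else if a1 = true ∨ t1 = true then "Web & UI"
       else if a2 = true ∨ t2 = true then "Infrastructure"
       else if a3 = true ∨ t3 = true then "Documentation"
       else if a4 = true ∨ t4 = true then "Testing"
       else if a5 = true ∨ t5 = true then "SDKs & Tools"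
       else "General") := by
  cases a0 <;> cases a1 <;> cases a2 <;> cases a3 <;> cases a4 <;> cases a5 <;>
    cases t0 <;> cases t1 <;> cases t2 <;> cases t3 <;> cases t4 <;> cases t5 <;> decide

-- A's nonempty set intersection, as an 'any' over the labels
theorem pv_inter_ne (labels : List String) (lits : List String) :
    (PySem.Set.inter (PySem.Set.ofList (labels.map (fun label => PySem.Str.lower label))) (PySem.Set.ofList lits) ≠ []
      ↔ labels.any (fun l => lits.contains (PySem.Str.lower l)) = true) := by
  have h1 : PySem.Set.inter (PySem.Set.ofList (labels.map (fun label => PySem.Str.lower label))) (PySem.Set.ofList lits)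
      = (PySem.Set.ofList (labels.map (fun label => PySem.Str.lower label))).filter
          (fun x => (PySem.Set.ofList lits).contains x) := rfl
  rw [h1, ne_eq, List.filter_eq_nil_iff]
  push Not
  simp only [PySem.Set.contains, List.contains_iff_mem, PySem.Set.mem_ofList, List.mem_map,
    List.any_eq_true]
  constructor
  · rintro ⟨x, ⟨l, hl, rfl⟩, hx⟩; exact ⟨l, hl, hx⟩
  · rintro ⟨l, hl, hx⟩; exact ⟨PySem.Str.lower l, ⟨l, hl, rfl⟩, hx⟩

-- the label pass of B, written with an explicit min
theorem pv_label_step (labels : List String) :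
    labels.foldl (fun best label =>
        let rank := PySem.Dict.getD pvLabelRank (PySem.Str.lower label) 6
        if rank < best then rank else best) (6:Int)
      = labels.foldl (fun a l => min a (PySem.Dict.getD pvLabelRank (PySem.Str.lower l) 6)) 6 := by
  have h : (fun (best : Int) (label : String) =>
        let rank := PySem.Dict.getD pvLabelRank (PySem.Str.lower label) 6
        if rank < best then rank else best)
      = (fun a l => min a (PySem.Dict.getD pvLabelRank (PySem.Str.lower l) 6)) := by
    funext b l; dsimp only; rw [min_def]; split_ifs <;> omega
  rw [h]

-- ===== VERDICT (by name: the statement is the Claim_ definition above) =====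
theorem categorize_real_issue_spec : Claim_equal_categorize_real_issue := by
  intro n title labels _
  unfold Spec_categorize_real_issue
  have hB : categorize_real_issue_alt n title labels =
      PySem.List.pyGetD pvCategories
        (min (pvCh6 (labels.any (fun l => PVL0.contains (PySem.Str.lower l)))
              (labels.any (fun l => PVL1.contains (PySem.Str.lower l)))
              (labels.any (fun l => PVL2.contains (PySem.Str.lower l)))
              (labels.any (fun l => PVL3.contains (PySem.Str.lower l)))
              (labels.any (fun l => PVL4.contains (PySem.Str.lower l)))
              (labels.any (fun l => PVL5.contains (PySem.Str.lower l))))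
          (pvCh6 (["grpc", "auth", "proto", "database"].any (fun word => PySem.Str.isIn word (PySem.Str.lower title)))
            (PySem.Str.isIn "/api/" (PySem.Str.lower title))
            (["ci", "workflow", "build"].any (fun word => PySem.Str.isIn word (PySem.Str.lower title)))
            (PySem.Str.isIn "doc" (PySem.Str.lower title))
            (PySem.Str.isIn "test" (PySem.Str.lower title))
            (["cli", "tool", "script"].any (fun word => PySem.Str.isIn word (PySem.Str.lower title))))) "General" := by
    unfold categorize_real_issue_alt
    dsimp only
    rw [pv_label_step, pv_labels_fold,
      pv_title_fold (PySem.Str.lower title) pvTitleKeywords (by decide) _ (pvCh6_le6 _ _ _ _ _ _),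
      pv_title_val]
  rw [hB, pv_catof]
  unfold categorize_real_issue
  simp only [pv_inter_ne, PVL0, PVL1, PVL2, PVL3, PVL4, PVL5]
  rfl
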